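-- pv_equiv track=rewrite | github.com/PedroMTQ/UniFuncNet | workflows/gsmm_expansion/gsmm_expansion.py | check_match_reactions
-- ===== SOURCE A (Python) =====
-- def check_match_reactions(model_compounds, unifuncnet_compounds):
--     res = 0
--     for r1 in model_compounds:
--         r1_set = {r1}
--         for r2 in unifuncnet_compounds:
--             if r1_set.intersection(r2):
--                 res += 1
--     return res
-- ===== SOURCE B (Python) =====
-- def check_match_reactions(model_compounds, unifuncnet_compounds):
--     counts = {}
--     for r2 in unifuncnet_compounds:
--         for element in set(r2):
--             counts[element] = counts.get(element, 0) + 1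
--     return sum(counts.get(r1, 0) for r1 in model_compounds)
-- ===== Notes on version B (the rewrite author's own statement) =====
-- stated objective: faster
-- what changed: Instead of scanning every unifuncnet set for every model compound, B builds in one pass a dict counting how many sets contain each element and then sums one O(1) lookup per model compound.
import Mathlib
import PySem

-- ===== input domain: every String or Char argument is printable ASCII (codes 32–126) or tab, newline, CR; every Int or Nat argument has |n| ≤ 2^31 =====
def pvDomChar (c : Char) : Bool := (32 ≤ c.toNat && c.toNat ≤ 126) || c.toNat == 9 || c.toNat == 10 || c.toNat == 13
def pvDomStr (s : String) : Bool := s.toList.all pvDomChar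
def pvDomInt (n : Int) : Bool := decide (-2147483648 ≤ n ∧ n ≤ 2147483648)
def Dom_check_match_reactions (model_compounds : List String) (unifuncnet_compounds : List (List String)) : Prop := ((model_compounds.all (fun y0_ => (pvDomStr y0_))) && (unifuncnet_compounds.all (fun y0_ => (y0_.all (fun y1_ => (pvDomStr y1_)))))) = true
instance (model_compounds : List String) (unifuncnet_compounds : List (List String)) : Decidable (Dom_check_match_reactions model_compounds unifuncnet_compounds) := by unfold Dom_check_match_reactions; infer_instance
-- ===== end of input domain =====

-- B replaces A's nested scan by a one-pass element→set-count dict plus one lookup per model compound (faster, asymptotic).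

-- ===== PORT A =====
def check_match_reactions (model_compounds : List String) (unifuncnet_compounds : List (List String)) : Int :=
  model_compounds.foldl (fun res r1 =>
    let r1_set : PySem.Set String := PySem.Set.ofList [r1]
    unifuncnet_compounds.foldl (fun res r2 =>
      if PySem.Set.inter r1_set r2 ≠ [] then res + 1 else res) res) 0

-- ===== PORT B =====
def check_match_reactions_alt (model_compounds : List String) (unifuncnet_compounds : List (List String)) : Int :=
  let counts : PySem.Dict String Int :=
    unifuncnet_compounds.foldl (fun counts r2 =>
      (PySem.Set.ofList r2).foldl (fun counts element =>
        counts.insert element (counts.getD element 0 + 1)) counts) PySem.Dict.empty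
  model_compounds.foldl (fun acc r1 => acc + counts.getD r1 0) 0

-- ===== PRECONDITION & SPEC =====
def Spec_check_match_reactions (model_compounds : List String) (unifuncnet_compounds : List (List String)) (out : Int) : Prop := out = check_match_reactions_alt model_compounds unifuncnet_compounds
instance (model_compounds : List String) (unifuncnet_compounds : List (List String)) (out : Int) : Decidable (Spec_check_match_reactions model_compounds unifuncnet_compounds out) := by unfold Spec_check_match_reactions; infer_instance

-- ===== CLAIM (what is proved, stated in full; the proofs are below) =====
def Claim_equal_check_match_reactions : Prop := ∀ (model_compounds : List String) (unifuncnet_compounds : List (List String)), Dom_check_match_reactions model_compounds unifuncnet_compounds → Spec_check_match_reactions model_compounds unifuncnet_compounds (check_match_reactions model_compounds unifuncnet_compounds)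

-- ===== LEMMAS AND PROOFS =====

-- {r1} ∩ r2 is nonempty iff r1 ∈ r2
theorem inter_singleton_ne_nil (r1 : String) (r2 : List String) :
    (PySem.Set.inter (PySem.Set.ofList [r1]) r2 ≠ []) ↔ r1 ∈ r2 := by
  simp [PySem.Set.ofList, PySem.Set.add, PySem.Set.inter, PySem.Set.empty,
        PySem.Set.contains, List.filter_cons]

-- counting loop over a list of elements: getD after the fold
theorem getD_count_fold (l : List String) (d : PySem.Dict String Int) (x : String) :
    (l.foldl (fun counts element => counts.insert element (counts.getD element 0 + 1)) d).getD x 0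
      = d.getD x 0 + l.count x := by
  induction l generalizing d with
  | nil => simp
  | cons e l ih =>
    simp only [List.foldl_cons, ih, PySem.Dict.getD_insert, List.count_cons]
    by_cases h : x = e
    · subst h; simp; omega
    · have : (e == x) = false := by simpa [beq_iff_eq] using fun hh => h hh.symm
      simp [h, this]

-- count in the dedup'd set: 1 if member, 0 otherwise
theorem count_ofList (r2 : List String) (x : String) :
    ((PySem.Set.ofList r2).count x : Int) = if x ∈ r2 then 1 else 0 := by
  have hn := PySem.Set.nodup_ofList (xs := r2) (α := String)
  by_cases h : x ∈ r2
  · have hx : x ∈ PySem.Set.ofList r2 := (PySem.Set.mem_ofList r2 x).mpr h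
    rw [if_pos h, List.count_eq_one_of_mem hn hx]; norm_num
  · have hx : x ∉ PySem.Set.ofList r2 := fun hh => h ((PySem.Set.mem_ofList r2 x).mp hh)
    simp [h, List.count_eq_zero_of_not_mem hx]

-- the dict built by B: getD x 0 = number of unifuncnet sets containing x
theorem getD_counts (ucs : List (List String)) (d : PySem.Dict String Int) (x : String) :
    (ucs.foldl (fun counts r2 =>
        (PySem.Set.ofList r2).foldl (fun counts element =>
          counts.insert element (counts.getD element 0 + 1)) counts) d).getD x 0
      = d.getD x 0 + (ucs.countP (fun r2 => decide (x ∈ r2)) : Int) := by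
  induction ucs generalizing d with
  | nil => simp
  | cons r2 ucs ih =>
    simp only [List.foldl_cons, ih, getD_count_fold, List.countP_cons]
    rw [count_ofList]
    by_cases h : x ∈ r2 <;> simp [h] <;> try ring

-- A's inner loop counts the sets containing r1
theorem inner_loop_eq (r1 : String) (ucs : List (List String)) (res : Int) :
    ucs.foldl (fun res r2 =>
        if PySem.Set.inter (PySem.Set.ofList [r1]) r2 ≠ [] then res + 1 else res) res
      = res + (ucs.countP (fun r2 => decide (r1 ∈ r2)) : Int) := by
  induction ucs generalizing res with
  | nil => simp
  | cons r2 ucs ih =>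
    simp only [List.foldl_cons, ih, List.countP_cons]
    by_cases h : r1 ∈ r2
    · rw [if_pos ((inter_singleton_ne_nil r1 r2).mpr h)]
      simp [h]; omega
    · rw [if_neg (fun hh => h ((inter_singleton_ne_nil r1 r2).mp hh))]
      simp [h]

-- ===== VERDICT (by name: the statement is the Claim_ definition above) =====
theorem check_match_reactions_spec : Claim_equal_check_match_reactions := by
  intro mcs ucs _
  unfold Spec_check_match_reactions check_match_reactions check_match_reactions_alt
  simp only [getD_counts, PySem.Dict.getD_empty, zero_add, inner_loop_eq]
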